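-- pv_equiv track=rewrite | github.com/viyiviyi/filter-blocked-words | scripts/prompts-filter.py | filter_empty
-- ===== SOURCE A (Python) =====
-- from typing import List
--
-- left_symbol = ['[','{','(']
--
-- right_symbol = [']','}',')']
--
-- def get_prompt(input:str):
--     return input.strip().lower()
--
-- def filter_empty(prompts:List[str],tag:str):
--     if not prompts: return prompts,tag
--     last = get_prompt(prompts[-1])
--     item = get_prompt(tag)
--     if item == ',' and last == ',':
--         return prompts,None
--     if item == ',' and last in left_symbol:
--         return prompts,None
--     if item in right_symbol and last == ',':
--         prompts = prompts[:-1]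
--         return filter_empty(prompts,tag)
--     if item in right_symbol and last in left_symbol:
--         prompts = prompts[:-1]
--         return filter_empty(prompts,tag)
--     return prompts,tag
-- ===== SOURCE B (Python) =====
-- from typing import List
--
-- left_symbol = ['[','{','(']
--
-- right_symbol = [']','}',')']
--
-- def get_prompt(input:str):
--     return input.strip().lower()
--
-- def filter_empty(prompts:List[str],tag:str):
--     if not prompts: return prompts,tag
--     item = get_prompt(tag)
--     if item == ',':
--         last = get_prompt(prompts[-1])
--         if last == ',' or last in left_symbol:
--             return prompts,None
--         return prompts,tag
--     if item in right_symbol: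
--         while prompts:
--             last = get_prompt(prompts[-1])
--             if last == ',' or last in left_symbol:
--                 prompts = prompts[:-1]
--             else:
--                 break
--         return prompts,tag
--     return prompts,tag
-- ===== Notes on version B (the rewrite author's own statement) =====
-- stated objective: alternative
-- what changed: B branches once on the tag type and replaces A's tail recursion (which re-tests the tag every round) with a single while-loop that strips trailing comma/opening-bracket prompts; uses slicing, never mutation.
import Mathlib
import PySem

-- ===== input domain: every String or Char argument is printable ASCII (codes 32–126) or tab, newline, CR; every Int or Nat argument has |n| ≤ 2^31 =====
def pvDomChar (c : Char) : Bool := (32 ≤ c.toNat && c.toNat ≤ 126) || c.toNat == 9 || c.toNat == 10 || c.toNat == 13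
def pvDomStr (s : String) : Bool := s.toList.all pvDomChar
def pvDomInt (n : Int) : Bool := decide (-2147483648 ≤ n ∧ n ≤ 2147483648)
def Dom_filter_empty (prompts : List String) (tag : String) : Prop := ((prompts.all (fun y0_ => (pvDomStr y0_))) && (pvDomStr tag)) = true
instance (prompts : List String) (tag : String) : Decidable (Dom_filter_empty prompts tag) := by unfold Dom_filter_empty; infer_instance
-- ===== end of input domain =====

-- B replaces A's tail recursion (re-testing the tag each round) by one branch on the tag
-- type and a single stripping loop; return values are identical (alternative decomposition).

-- ===== PORT A =====
def pvLeftSymbol : List String := ["[", "{", "("]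
def pvRightSymbol : List String := ["]", "}", ")"]

def pvGetPrompt (input : String) : String := PySem.Str.lower (PySem.Str.strip input)

def filter_empty (prompts : List String) (tag : String) : List String × Option String :=
  if prompts = [] then (prompts, some tag)
  else
    let last := pvGetPrompt ((PySem.List.pyGet? prompts (-1)).getD "")
    let item := pvGetPrompt tag
    if item = "," ∧ last = "," then (prompts, none)
    else if item = "," ∧ last ∈ pvLeftSymbol then (prompts, none)
    else if item ∈ pvRightSymbol ∧ last = "," then filter_empty prompts.dropLast tag
    else if item ∈ pvRightSymbol ∧ last ∈ pvLeftSymbol then filter_empty prompts.dropLast tag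
    else (prompts, some tag)
termination_by prompts.length
decreasing_by
  all_goals
    simp only [List.length_dropLast]
    have h : ¬ prompts = [] := by assumption
    have : prompts.length ≠ 0 := by simpa [List.length_eq_zero_iff] using h
    omega

-- ===== PORT B =====
-- the `while prompts:` stripping loop of Source B
def pvStripLoop (prompts : List String) : List String :=
  if prompts = [] then prompts
  else
    let last := pvGetPrompt ((PySem.List.pyGet? prompts (-1)).getD "")
    if last = "," ∨ last ∈ pvLeftSymbol then pvStripLoop prompts.dropLast
    else prompts
termination_by prompts.length
decreasing_by
  simp only [List.length_dropLast]
  have h2 : ¬ prompts = [] := by assumption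
  have : prompts.length ≠ 0 := by simpa [List.length_eq_zero_iff] using h2
  omega

def filter_empty_alt (prompts : List String) (tag : String) : List String × Option String :=
  if prompts = [] then (prompts, some tag)
  else
    let item := pvGetPrompt tag
    if item = "," then
      let last := pvGetPrompt ((PySem.List.pyGet? prompts (-1)).getD "")
      if last = "," ∨ last ∈ pvLeftSymbol then (prompts, none)
      else (prompts, some tag)
    else if item ∈ pvRightSymbol then (pvStripLoop prompts, some tag)
    else (prompts, some tag)

-- ===== PRECONDITION & SPEC =====
def Spec_filter_empty (prompts : List String) (tag : String) (out : List String × Option String) : Prop := out = filter_empty_alt prompts tag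
instance (prompts : List String) (tag : String) (out : List String × Option String) : Decidable (Spec_filter_empty prompts tag out) := by unfold Spec_filter_empty; infer_instance

-- ===== CLAIM (what is proved, stated in full; the proofs are below) =====
def Claim_equal_filter_empty : Prop := ∀ (prompts : List String) (tag : String), Dom_filter_empty prompts tag → Spec_filter_empty prompts tag (filter_empty prompts tag)

-- ===== LEMMAS AND PROOFS =====

lemma pv_right_ne_comma {s : String} (h : s ∈ pvRightSymbol) : s ≠ "," := by
  simp only [pvRightSymbol, List.mem_cons, List.not_mem_nil, or_false] at h
  rcases h with h | h | h <;> subst h <;> decide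

-- when the tag is a closing bracket, A's recursion computes exactly B's stripping loop
lemma pv_aux (tag : String) (hr : pvGetPrompt tag ∈ pvRightSymbol) :
    ∀ (n : Nat) (prompts : List String), prompts.length ≤ n →
      filter_empty prompts tag = (pvStripLoop prompts, some tag) := by
  intro n
  induction n with
  | zero =>
    intro prompts hlen
    have he : prompts = [] := by cases prompts <;> simp_all
    subst he
    rw [filter_empty, pvStripLoop]; simp
  | succ n ih =>
    intro prompts hlen
    by_cases he : prompts = []
    · subst he; rw [filter_empty, pvStripLoop]; simp
    · have hic : pvGetPrompt tag ≠ "," := pv_right_ne_comma hr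
      have hlt : prompts.dropLast.length ≤ n := by
        have : prompts.length ≠ 0 := by simpa [List.length_eq_zero_iff] using he
        simp only [List.length_dropLast]; omega
      rw [filter_empty, pvStripLoop]
      simp only [if_neg he]
      by_cases hc : pvGetPrompt ((PySem.List.pyGet? prompts (-1)).getD "") = ","
      · simp [hic, hc, hr, ih _ hlt, pvLeftSymbol]
      · by_cases hl : pvGetPrompt ((PySem.List.pyGet? prompts (-1)).getD "") ∈ pvLeftSymbol
        · simp [hic, hc, hl, hr, ih _ hlt]
        · simp [hic, hc, hl]

lemma pv_main (prompts : List String) (tag : String) :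
    filter_empty prompts tag = filter_empty_alt prompts tag := by
  by_cases he : prompts = []
  · subst he; rw [filter_empty, filter_empty_alt]; simp
  · rw [filter_empty_alt]
    simp only [if_neg he]
    by_cases hi : pvGetPrompt tag = ","
    · have hnr : pvGetPrompt tag ∉ pvRightSymbol := fun h => pv_right_ne_comma h hi
      rw [filter_empty]
      simp only [if_neg he, if_pos hi, hnr, false_and, if_false]
      by_cases hc : pvGetPrompt ((PySem.List.pyGet? prompts (-1)).getD "") = ","
      · simp [hi, hc]
      · by_cases hl : pvGetPrompt ((PySem.List.pyGet? prompts (-1)).getD "") ∈ pvLeftSymbol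
        · simp [hi, hc, hl]
        · simp [hi, hc, hl]
    · simp only [if_neg hi]
      by_cases hr : pvGetPrompt tag ∈ pvRightSymbol
      · simp only [if_pos hr]
        exact pv_aux tag hr prompts.length prompts le_rfl
      · rw [filter_empty]
        simp [he, hi, hr]

-- ===== VERDICT (by name: the statement is the Claim_ definition above) =====
theorem filter_empty_spec : Claim_equal_filter_empty := by
  intro prompts tag _
  exact pv_main prompts tag
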